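-- pv_equiv track=rewrite | github.com/Nivellem/Python_Scripts | zadanie2.py | powtarzajace_znaki
-- ===== SOURCE A (Python) =====
-- def powtarzajace_znaki(zdanie):
--     # utwórz słownik, w którym kluczami są znaki, a wartościami ich liczba wystąpień
--     liczniki = {}
--     for znak in zdanie:
--         if znak in liczniki:
--             liczniki[znak] += 1
--         else:
--             liczniki[znak] = 1
--
--     # wybierz znaki, które występują więcej niż raz
--     powtarzajace = [znak for znak in liczniki if liczniki[znak] > 1]
--
--     # posortuj znaki malejąco według liczby ich wystąpień
--     powtarzajace.sort(reverse=True, key=lambda znak: liczniki[znak])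
--
--     return powtarzajace
-- ===== SOURCE B (Python) =====
-- def powtarzajace_znaki(zdanie):
--     # czestosci znakow
--     liczniki = {}
--     for znak in zdanie:
--         liczniki[znak] = liczniki.get(znak, 0) + 1
--     # kubelki: licznik -> znaki w kolejnosci wstawiania
--     grupy = {}
--     for znak, ile in liczniki.items():
--         if ile > 1:
--             grupy.setdefault(ile, []).append(znak)
--     # sortowanie przez zliczanie: od najwiekszej czestosci do 2
--     maks = max(liczniki.values(), default=0)
--     wynik = []
--     for ile in range(maks, 1, -1):
--         wynik += grupy.get(ile, [])
--     return wynik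
-- ===== Notes on version B (the rewrite author's own statement) =====
-- stated objective: alternative
-- what changed: A selects the repeated characters and orders them with a stable comparison sort keyed by descending count; B instead buckets each repeated character under its count in a dict and emits the buckets from the highest count down to 2 (a counting sort), preserving insertion order within each bucket.
import Mathlib
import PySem

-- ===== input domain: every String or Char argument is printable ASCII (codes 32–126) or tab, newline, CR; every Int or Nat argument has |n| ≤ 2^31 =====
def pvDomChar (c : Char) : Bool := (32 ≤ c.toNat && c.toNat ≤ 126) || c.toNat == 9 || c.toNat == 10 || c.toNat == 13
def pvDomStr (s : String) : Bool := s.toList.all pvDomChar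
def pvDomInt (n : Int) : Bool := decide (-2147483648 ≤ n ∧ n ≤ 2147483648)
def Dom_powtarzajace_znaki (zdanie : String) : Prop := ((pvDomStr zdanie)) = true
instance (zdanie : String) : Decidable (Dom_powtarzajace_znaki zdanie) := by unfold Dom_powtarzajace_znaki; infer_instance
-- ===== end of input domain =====

-- B replaces A's comparison sort (stable sort by descending count) with a counting sort:
-- characters are bucketed by their count and the buckets are emitted from the highest count down to 2.

-- ===== PORT A =====
def powtarzajace_znaki (zdanie : String) : List String :=
  let liczniki := zdanie.toList.foldl (fun d znak =>
      if d.contains (String.ofList [znak]) then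
        d.insert (String.ofList [znak]) (d.getD (String.ofList [znak]) 0 + 1)
      else
        d.insert (String.ofList [znak]) 1)
    (PySem.Dict.empty : PySem.Dict String Int)
  let powtarzajace := liczniki.keys.filter (fun znak => decide (1 < liczniki.getD znak 0))
  PySem.List.sorted powtarzajace (fun znak => liczniki.getD znak 0) true

-- ===== PORT B =====
def powtarzajace_znaki_alt (zdanie : String) : List String :=
  let liczniki := zdanie.toList.foldl (fun d znak =>
      d.insert (String.ofList [znak]) (d.getD (String.ofList [znak]) 0 + 1))
    (PySem.Dict.empty : PySem.Dict String Int)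
  let grupy := liczniki.items.foldl (fun g p =>
      if 1 < p.2 then g.modify p.2 [] (fun l => l ++ [p.1]) else g)
    (PySem.Dict.empty : PySem.Dict Int (List String))
  let maks := PySem.List.maxD liczniki.values (fun v => v) 0
  (PySem.List.pyRange maks 1 (-1)).foldl (fun wynik ile => wynik ++ grupy.getD ile []) []

-- ===== PRECONDITION & SPEC =====
def Spec_powtarzajace_znaki (zdanie : String) (out : List String) : Prop := out = powtarzajace_znaki_alt zdanie
instance (zdanie : String) (out : List String) : Decidable (Spec_powtarzajace_znaki zdanie out) := by unfold Spec_powtarzajace_znaki; infer_instance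

-- ===== CLAIM (what is proved, stated in full; the proofs are below) =====
def Claim_equal_powtarzajace_znaki : Prop := ∀ (zdanie : String), Dom_powtarzajace_znaki zdanie → Spec_powtarzajace_znaki zdanie (powtarzajace_znaki zdanie)

-- ===== LEMMAS AND PROOFS =====

-- insertBy skips a prefix it is not 'before'
theorem pv_insertBy_append_not {α : Type} (before : α → α → Bool) (x : α)
    (A B : List α) (h : ∀ y ∈ A, before x y = false) :
    PySem.List.insertBy before x (A ++ B) = A ++ PySem.List.insertBy before x B := by
  induction A with
  | nil => simp
  | cons a A ih =>
      have ha : before x a = false := h a (by simp)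
      simp [PySem.List.insertBy, ha, ih (fun y hy => h y (by simp [hy]))]

-- insertBy puts x in front when it is before everything
theorem pv_insertBy_all {α : Type} (before : α → α → Bool) (x : α)
    (L : List α) (h : ∀ y ∈ L, before x y = true) :
    PySem.List.insertBy before x L = x :: L := by
  cases L with
  | nil => simp [PySem.List.insertBy]
  | cons y ys => simp [PySem.List.insertBy, h y (by simp)]

-- stable insertion into a bucket concatenation (buckets listed by strictly decreasing key)
theorem pv_insertBy_flatMap {α : Type} (key : α → Int) (x : α) :
    ∀ (ks : List Int) (g : Int → List α), ks.Pairwise (· > ·) → key x ∈ ks →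
      (∀ c ∈ ks, ∀ y ∈ g c, key y = c) →
      PySem.List.insertBy (fun a b => decide (key b < key a)) x (ks.flatMap g)
        = ks.flatMap (fun c => g c ++ if key x = c then [x] else []) := by
  intro ks
  induction ks with
  | nil => intro g _ hx _; simp at hx
  | cons c rest ih =>
      intro g hpw hx hg
      have hrest_lt : ∀ c' ∈ rest, c' < c := by
        intro c' hc'; exact (List.pairwise_cons.mp hpw).1 c' hc'
      by_cases hkc : key x = c
      · have h1 : ∀ y ∈ g c, (fun a b => decide (key b < key a)) x y = false := by
          intro y hy
          have := hg c (by simp) y hy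
          simp [this, hkc]
        have h2 : ∀ y ∈ rest.flatMap g, (fun a b => decide (key b < key a)) x y = true := by
          intro y hy
          obtain ⟨c', hc', hyc'⟩ := List.mem_flatMap.mp hy
          have hk := hg c' (by simp [hc']) y hyc'
          have := hrest_lt c' hc'
          simp [hk, hkc]; omega
        have hcongr : rest.flatMap (fun c' => g c' ++ if key x = c' then [x] else [])
            = rest.flatMap g := by
          apply List.flatMap_congr
          intro c' hc'
          have := hrest_lt c' hc'
          have : key x ≠ c' := by omega
          simp [this]
        simp only [List.flatMap_cons]
        rw [pv_insertBy_append_not _ _ _ _ h1, pv_insertBy_all _ _ _ h2, hcongr]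
        simp [hkc]
      · have hx' : key x ∈ rest := by
          rcases List.mem_cons.mp hx with h | h
          · exact absurd h hkc
          · exact h
        have hxlt : key x < c := hrest_lt _ hx'
        have h1 : ∀ y ∈ g c, (fun a b => decide (key b < key a)) x y = false := by
          intro y hy
          have := hg c (by simp) y hy
          simp [this]; omega
        simp only [List.flatMap_cons]
        rw [pv_insertBy_append_not _ _ _ _ h1,
          ih g (List.pairwise_cons.mp hpw).2 hx' (fun c' hc' => hg c' (by simp [hc']))]
        simp [hkc]

-- stable reverse sort = concatenation of key buckets, highest key first
theorem pv_sorted_rev_eq_flatMap {α : Type} (key : α → Int) :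
    ∀ (xs : List α) (ks : List Int), ks.Pairwise (· > ·) → (∀ x ∈ xs, key x ∈ ks) →
      PySem.List.sorted xs key true = ks.flatMap (fun c => xs.filter (fun x => key x == c)) := by
  intro xs
  induction xs using List.reverseRecOn with
  | nil => intro ks _ _; simp [PySem.List.sorted_rev_eq_foldl_insertBy]
  | append_singleton xs x ih =>
      intro ks hpw hmem
      rw [PySem.List.sorted_rev_eq_foldl_insertBy, List.foldl_append]
      simp only [List.foldl_cons, List.foldl_nil]
      rw [← PySem.List.sorted_rev_eq_foldl_insertBy]
      rw [ih ks hpw (fun y hy => hmem y (by simp [hy]))]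
      rw [pv_insertBy_flatMap key x ks (fun c => xs.filter (fun x => key x == c)) hpw
        (hmem x (by simp))
        (by intro c _ y hy
            have := List.mem_filter.mp hy
            exact beq_iff_eq.mp this.2)]
      apply List.flatMap_congr
      intro c _
      simp only [List.filter_append, List.filter_singleton]
      by_cases h : key x = c
      · simp [h]
      · have hb : (key x == c) = false := by simp [h]
        simp [hb, h]

-- range(a, b, -1) as a mapped List.range
theorem pv_pyRange_neg_one (a b : Int) :
    PySem.List.pyRange a b (-1) = (List.range (a - b).toNat).map (fun (k : Nat) => a - (k : Int)) := by
  simp only [PySem.List.pyRange]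
  have h0 : ((-1 : Int) = 0) = False := by simp
  have h1 : ((0:Int) < -1) = False := by simp
  simp only [h0, h1, if_false]
  by_cases h : b < a
  · simp only [if_pos h]
    have he : (a - b + - -1 - 1) / -(-1) = a - b := by norm_num
    rw [he]
    apply List.map_congr_left
    intro k _
    ring
  · simp only [if_neg h]
    have : (a - b).toNat = 0 := by omega
    simp [this]

theorem pv_mem_pyRange_neg_one (a b x : Int) :
    x ∈ PySem.List.pyRange a b (-1) ↔ b < x ∧ x ≤ a := by
  rw [pv_pyRange_neg_one]
  simp only [List.mem_map, List.mem_range]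
  constructor
  · rintro ⟨k, hk, rfl⟩; omega
  · intro ⟨h1, h2⟩; exact ⟨(a - x).toNat, by omega, by omega⟩

theorem pv_pairwise_pyRange_neg_one (a b : Int) :
    (PySem.List.pyRange a b (-1)).Pairwise (· > ·) := by
  rw [pv_pyRange_neg_one]
  refine List.Pairwise.map _ (fun i j hij => ?_) List.pairwise_lt_range
  simp only [gt_iff_lt] at *
  omega

-- the two counting loops build the same dict, namely counter of the 1-char strings
theorem pv_dictB_eq (l : List Char) :
    l.foldl (fun d znak =>
      d.insert (String.ofList [znak]) (d.getD (String.ofList [znak]) 0 + 1))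
      (PySem.Dict.empty : PySem.Dict String Int)
    = PySem.Dict.counter (l.map (fun c => String.ofList [c])) := by
  rw [← PySem.Dict.foldl_insert_getD_add_one_eq_counter, List.foldl_map]

theorem pv_dicts_eq (l : List Char) :
    l.foldl (fun d znak =>
      if d.contains (String.ofList [znak]) then
        d.insert (String.ofList [znak]) (d.getD (String.ofList [znak]) 0 + 1)
      else
        d.insert (String.ofList [znak]) 1) (PySem.Dict.empty : PySem.Dict String Int)
    = PySem.Dict.counter (l.map (fun c => String.ofList [c])) := by
  have hfun : (fun (d : PySem.Dict String Int) (znak : Char) =>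
      if d.contains (String.ofList [znak]) then
        d.insert (String.ofList [znak]) (d.getD (String.ofList [znak]) 0 + 1)
      else
        d.insert (String.ofList [znak]) 1)
      = (fun d znak => d.insert (String.ofList [znak]) (d.getD (String.ofList [znak]) 0 + 1)) := by
    funext d znak
    by_cases h : d.contains (String.ofList [znak]) = true
    · simp [h]
    · have h' : d.contains (String.ofList [znak]) = false := by simpa using h
      rw [if_neg (by simp [h']), PySem.Dict.getD_of_not_contains]
      · norm_num
      · exact h'
  rw [hfun]
  exact pv_dictB_eq l

-- B's bucket dict looked up at c is exactly the bucket of keys with count c (> 1)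
theorem pv_grupy_getD (xs : List String) (c : Int) :
    ((PySem.Dict.counter xs).items.foldl (fun g p =>
        if 1 < p.2 then g.modify p.2 [] (fun l => l ++ [p.1]) else g)
      (PySem.Dict.empty : PySem.Dict Int (List String))).getD c []
    = ((PySem.Dict.counter xs).keys.filter
        (fun z => decide (1 < (PySem.Dict.counter xs).getD z 0))).filter
        (fun z => (PySem.Dict.counter xs).getD z 0 == c) := by
  rw [PySem.List.foldl_ite_eq_foldl_filter]
  rw [show (List.filter (fun p => decide (1 < p.2)) (PySem.Dict.counter xs).items).foldl
        (fun (g : PySem.Dict Int (List String)) p => g.modify p.2 [] (fun l => l ++ [p.1])) PySem.Dict.empty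
      = ((List.filter (fun p => decide (1 < p.2)) (PySem.Dict.counter xs).items).map Prod.swap).foldl
        (fun (g : PySem.Dict Int (List String)) p => g.modify p.1 [] (fun l => l ++ [p.2])) PySem.Dict.empty
      from (List.foldl_map (f := Prod.swap)
        (g := fun (g : PySem.Dict Int (List String)) p => g.modify p.1 [] (fun l => l ++ [p.2]))
        (l := List.filter (fun p => decide (1 < p.2)) (PySem.Dict.counter xs).items)
        (init := PySem.Dict.empty)).symm]
  rw [PySem.Dict.getD_foldl_modify_append]
  simp [PySem.Dict.items_counter, PySem.Dict.keys_counter, PySem.Dict.getD_counter,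
    List.filter_map, List.map_map, Function.comp_def]

-- every value in the list is bounded by max(vs, default=0)
theorem pv_le_maxD (v : Int) (vs : List Int) (hv : v ∈ vs) :
    v ≤ PySem.List.maxD vs (fun x => x) 0 := by
  cases vs with
  | nil => simp at hv
  | cons x t =>
      simp only [PySem.List.maxD, PySem.List.max?_id_cons, Option.getD_some]
      rcases List.mem_cons.mp hv with rfl | h
      · exact (PySem.List.le_foldl_max t v).1
      · exact (PySem.List.le_foldl_max t x).2 v h

theorem pv_main (zdanie : String) :
    powtarzajace_znaki zdanie = powtarzajace_znaki_alt zdanie := by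
  simp only [powtarzajace_znaki, powtarzajace_znaki_alt, pv_dicts_eq, pv_dictB_eq]
  rw [PySem.List.foldl_append_eq_flatMap, List.nil_append]
  rw [pv_sorted_rev_eq_flatMap (fun z => (PySem.Dict.counter (zdanie.toList.map (fun c => String.ofList [c]))).getD z 0)
    _ (PySem.List.pyRange (PySem.List.maxD (PySem.Dict.counter (zdanie.toList.map (fun c => String.ofList [c]))).values (fun v => v) 0) 1 (-1))
    (pv_pairwise_pyRange_neg_one _ _) ?hmem]
  case hmem =>
    intro z hz
    have hz' := List.mem_filter.mp hz
    have h1 : 1 < (PySem.Dict.counter (zdanie.toList.map (fun c => String.ofList [c]))).getD z 0 := by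
      simpa using hz'.2
    have hval : (PySem.Dict.counter (zdanie.toList.map (fun c => String.ofList [c]))).getD z 0
        ∈ (PySem.Dict.counter (zdanie.toList.map (fun c => String.ofList [c]))).values := by
      rw [PySem.Dict.values_eq_map_keys _ (PySem.Dict.nodup_keys_counter _) 0]
      exact List.mem_map.mpr ⟨z, hz'.1, rfl⟩
    have h2 := pv_le_maxD _ _ hval
    rw [pv_mem_pyRange_neg_one]
    exact ⟨h1, h2⟩
  apply List.flatMap_congr
  intro c _
  exact (pv_grupy_getD (zdanie.toList.map (fun c => String.ofList [c])) c).symm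

-- ===== VERDICT (by name: the statement is the Claim_ definition above) =====
theorem powtarzajace_znaki_spec : Claim_equal_powtarzajace_znaki := by
  intro zdanie _
  exact pv_main zdanie
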